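-- pv_equiv track=rewrite | github.com/p4v0/ApoorvCTF-25 | Contraseña transformada.py | reverse_sub_12cb
-- ===== SOURCE A (Python) =====
-- def reverse_sub_12cb(s):
--     result = []
--     i = 0
--     while i < len(s):
--         result.append(s[i])
--         if (len(result) + 1) % 4 == 0:
--             i += 1  # Saltar el carácter especial
--         i += 1
--     return "".join(result)
-- ===== SOURCE B (Python) =====
-- def reverse_sub_12cb(s):
--     return "".join(c for i, c in enumerate(s) if i % 5 != 3)
-- ===== Notes on version B (the rewrite author's own statement) =====
-- stated objective: simpler
-- what changed: Replaced A's while loop with mutable index and a skip-counter driven by the accumulated result length ((len(result)+1)%4==0 => skip next char) by a single comprehension keeping exactly the input characters whose index i satisfies i % 5 != 3, a closed-form index predicate.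
import Mathlib
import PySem

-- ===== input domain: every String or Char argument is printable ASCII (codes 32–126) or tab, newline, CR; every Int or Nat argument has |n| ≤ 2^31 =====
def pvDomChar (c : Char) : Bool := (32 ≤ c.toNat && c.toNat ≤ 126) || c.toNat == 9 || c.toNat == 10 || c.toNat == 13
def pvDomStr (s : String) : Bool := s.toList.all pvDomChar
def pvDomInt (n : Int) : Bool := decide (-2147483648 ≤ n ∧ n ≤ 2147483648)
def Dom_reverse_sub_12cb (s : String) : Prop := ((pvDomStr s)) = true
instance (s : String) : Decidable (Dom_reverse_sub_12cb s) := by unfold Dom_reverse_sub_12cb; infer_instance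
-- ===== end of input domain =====

-- B replaces A's stateful skip-counter loop (advance i by 2 whenever (len(result)+1)%4==0)
-- by a closed-form index predicate: keep exactly the characters whose index i satisfies i % 5 != 3.
-- Objective: simpler (one comprehension instead of a while loop with mutable skip state).

-- ===== PORT A =====
-- while i < len(s): append s[i]; if (len(result)+1)%4==0 then i+=1; i+=1
def pvALoop (cs : List Char) (i : Nat) (result : List Char) : List Char :=
  if h : i < cs.length then
    let result := result ++ [cs[i]]
    let i := if (result.length + 1) % 4 = 0 then i + 1 else i
    pvALoop cs (i + 1) result
  else
    result
termination_by cs.length - i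
decreasing_by simp_wf; split <;> omega

def reverse_sub_12cb (s : String) : String :=
  String.mk (pvALoop s.toList 0 [])

-- ===== PORT B =====
-- "".join(c for i, c in enumerate(s) if i % 5 != 3)
def reverse_sub_12cb_alt (s : String) : String :=
  String.mk ((((PySem.List.enumerate s.toList 0).filter
      (fun p => PySem.Int.mod p.1 5 != 3)).map Prod.snd))

-- ===== PRECONDITION & SPEC =====
def Spec_reverse_sub_12cb (s : String) (out : String) : Prop := out = reverse_sub_12cb_alt s
instance (s : String) (out : String) : Decidable (Spec_reverse_sub_12cb s out) := by unfold Spec_reverse_sub_12cb; infer_instance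

-- ===== CLAIM (what is proved, stated in full; the proofs are below) =====
def Claim_equal_reverse_sub_12cb : Prop := ∀ (s : String), Dom_reverse_sub_12cb s → Spec_reverse_sub_12cb s (reverse_sub_12cb s)

-- ===== LEMMAS AND PROOFS =====

-- proof-only normal form: characters of cs at running index n, n, n+1, … keeping index % 5 ≠ 3
def pvKeep : List Char → Nat → List Char
  | [], _ => []
  | c :: cs, n => (if n % 5 ≠ 3 then [c] else []) ++ pvKeep cs (n + 1)

theorem pvEnum_filter_eq_keep (cs : List Char) (n : Nat) :
    (((PySem.List.enumerate cs (n : Int)).filter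
        (fun p => PySem.Int.mod p.1 5 != 3)).map Prod.snd) = pvKeep cs n := by
  induction cs generalizing n with
  | nil => simp [PySem.List.enumerate_nil, pvKeep]
  | cons c cs ih =>
    have hmod : PySem.Int.mod (n : Int) 5 = ((n % 5 : Nat) : Int) :=
      PySem.Int.mod_natCast n 5
    by_cases h : n % 5 = 3
    · have h3 : ((n : Int) % 5 = 3) := by omega
      simp [PySem.List.enumerate_cons, pvKeep, h, ← ih (n + 1), h3]
    · have h3 : ¬((n : Int) % 5 = 3) := by omega
      simp [PySem.List.enumerate_cons, pvKeep, h, ← ih (n + 1), h3]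

theorem pvALoop_eq_keep (cs : List Char) (i : Nat) (result : List Char)
    (hinv : i = result.length + (result.length + 1) / 4) :
    pvALoop cs i result = result ++ pvKeep (cs.drop i) i := by
  by_cases h : i < cs.length
  · have hi5 : i % 5 ≠ 3 := by omega
    have hdrop : cs.drop i = cs[i] :: cs.drop (i + 1) :=
      List.drop_eq_getElem_cons h
    by_cases hc : (result.length + 1 + 1) % 4 = 0
    · -- skip branch: i jumps by 2, index i+1 (≡ 3 mod 5) is dropped by pvKeep too
      have h15 : (i + 1) % 5 = 3 := by omega
      have hrec := pvALoop_eq_keep cs (i + 2) (result ++ [cs[i]]) (by simp; omega)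
      rw [pvALoop]
      simp only [h, dif_pos, List.length_append, List.length_singleton]
      rw [if_pos (by simpa using hc), hrec, hdrop, pvKeep]
      by_cases h1 : i + 1 < cs.length
      · rw [List.drop_eq_getElem_cons h1, pvKeep]
        simp [hi5, h15]
      · have : cs.drop (i + 1) = [] := List.drop_eq_nil_of_le (by omega)
        have h2 : cs.drop (i + 2) = [] := List.drop_eq_nil_of_le (by omega)
        simp [this, h2, pvKeep, hi5]
    · have hrec := pvALoop_eq_keep cs (i + 1) (result ++ [cs[i]]) (by simp; omega)
      rw [pvALoop]
      simp only [h, dif_pos, List.length_append, List.length_singleton]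
      rw [if_neg (by simpa using hc), hrec, hdrop, pvKeep]
      simp [hi5]
  · have hd : cs.drop i = [] := List.drop_eq_nil_of_le (by omega)
    rw [pvALoop]
    simp [h, hd, pvKeep]
termination_by cs.length - i

-- ===== VERDICT (by name: the statement is the Claim_ definition above) =====
theorem reverse_sub_12cb_spec : Claim_equal_reverse_sub_12cb := by
  intro s _
  unfold Spec_reverse_sub_12cb reverse_sub_12cb reverse_sub_12cb_alt
  rw [pvALoop_eq_keep s.toList 0 [] (by simp)]
  have h := pvEnum_filter_eq_keep s.toList 0
  norm_num at h
  simp [h]
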